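-- pv_equiv track=rewrite | github.com/ericmerle3789/Collatz-Junction-Theorem | scripts/dp_cumulative_n0.py | dp_count_n0_mod_p
-- ===== SOURCE A (Python) =====
-- def dp_count_n0_mod_p(k, S, p):
--     """
--     Count cumulative sequences with corrSum ≡ 0 (mod p).
--
--     DP state: dp[j][r] = number of ways to choose j positions from {current...S-1}
--     such that the partial corrSum ≡ r (mod p).
--
--     We process positions from S-1 down to 1, deciding whether to include each.
--     Position 0 is always included (σ_0 = 0, contributes 3^{k-1} · 2^0 = 3^{k-1}).
--
--     For positions σ_1,...,σ_{k-1}: choose k-1 from {1,...,S-1}.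
--     The i-th chosen position (in increasing order) gets weight 3^{k-1-i} · 2^{σ_i}.
--
--     But the weight depends on the rank i, not just the position σ_i!
--     This makes the DP harder — we need to track how many have been chosen.
--
--     DP: dp[pos][chosen][residue] = count
--     - pos: current position (from 1 to S-1)
--     - chosen: how many positions have been selected so far (0 to k-1)
--     - residue: partial corrSum mod p
--
--     Complexity: O(S * k * p)
--     """
--     # Powers mod p
--     pow3 = [pow(3, e, p) for e in range(k)]
--     pow2 = [pow(2, e, p) for e in range(S)]
--
--     # Fixed contribution from σ_0 = 0: 3^{k-1} · 2^0 = 3^{k-1}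
--     base_residue = pow3[k-1] % p
--
--     # We need to choose k-1 positions from {1,...,S-1} in increasing order.
--     # Position chosen as the j-th (j=1,...,k-1) gets weight 3^{k-1-j} · 2^{pos}.
--     # After choosing j-1 positions from {1,...,pos-1}, if we choose pos as the j-th,
--     # it contributes 3^{k-1-j} · 2^{pos} mod p.
--
--     # DP: dp[chosen][residue] = count of ways
--     # Iterate pos from 1 to S-1
--
--     # dp[j][r] = number of ways to have chosen j positions from {1,...,pos-1}
--     # with partial sum ≡ r mod p
--
--     # Initialize: 0 positions chosen, residue 0
--     dp = [[0] * p for _ in range(k)]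
--     dp[0][0] = 1  # 0 positions chosen, residue 0
--
--     for pos in range(1, S):
--         # Process in reverse order of chosen to avoid double-counting
--         for j in range(min(k-2, pos-1), -1, -1):
--             # If we choose pos as the (j+1)-th position:
--             # weight = 3^{k-1-(j+1)} · 2^{pos} = 3^{k-2-j} · 2^{pos}
--             weight = (pow3[k-2-j] * pow2[pos]) % p
--
--             for r in range(p):
--                 if dp[j][r] > 0:
--                     new_r = (r + weight) % p
--                     dp[j+1][new_r] += dp[j][r]
--
--     # Answer: dp[k-1][target] where target = (p - base_residue) % p
--     # Because we need base_residue + partial_sum ≡ 0 mod p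
--     target = (p - base_residue) % p
--     return dp[k-1][target]
-- ===== SOURCE B (Python) =====
-- def dp_count_n0_mod_p(k, S, p):
--     """Layer-major, column-major prefix-sum DP: for each rank j build, per residue r,
--     the whole column over prefix positions as a running sum from rank j-1's columns,
--     instead of A's in-place position-major knapsack update."""
--     pow3 = [pow(3, e, p) for e in range(k)]
--     pow2 = [pow(2, e, p) for e in range(S)]
--     target = (p - pow3[k - 1] % p) % p
--     m = max(S, 1)
--     # cols[r][pos] = ways to choose 0 positions from {1..pos} with weighted sum = r (mod p)
--     cols = [[1 if r == 0 else 0] * m for r in range(p)]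
--     for j in range(1, k):
--         w3 = pow3[k - 1 - j]
--         wts = [(w3 * pow2[pos]) % p for pos in range(1, m)]
--         newcols = []
--         for r in range(p):
--             s = 0
--             col = [0]
--             for pos in range(1, m):
--                 s += cols[(r - wts[pos - 1]) % p][pos - 1]
--                 col.append(s)
--             newcols.append(col)
--         cols = newcols
--     return cols[target][m - 1]
-- ===== Notes on version B (the rewrite author's own statement) =====
-- stated objective: alternative
-- what changed: A scans positions outermost and updates one dp[rank][residue] table in place (descending rank loop, min(k-2,pos-1) bound, >0 guard); B swaps the loop nesting: ranks outermost, and per rank it rebuilds a transposed residue-by-position table, computing each residue's column in one running prefix-sum pass over positions.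
import Mathlib
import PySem

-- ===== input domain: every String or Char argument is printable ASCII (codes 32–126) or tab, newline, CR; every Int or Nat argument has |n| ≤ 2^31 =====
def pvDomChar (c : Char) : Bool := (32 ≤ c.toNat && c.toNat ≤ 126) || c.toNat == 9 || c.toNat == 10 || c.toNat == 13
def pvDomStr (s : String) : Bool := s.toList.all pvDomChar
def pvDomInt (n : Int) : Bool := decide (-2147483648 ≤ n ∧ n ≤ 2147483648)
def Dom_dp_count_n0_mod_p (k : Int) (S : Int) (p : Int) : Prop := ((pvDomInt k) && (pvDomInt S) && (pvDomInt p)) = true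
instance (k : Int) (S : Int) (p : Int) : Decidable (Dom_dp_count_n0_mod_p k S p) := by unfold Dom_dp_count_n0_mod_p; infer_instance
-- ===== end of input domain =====

-- B replaces A's in-place position-major knapsack update by a layer-major prefix DP that
-- rebuilds the whole prefix×residue table once per rank (objective: alternative decomposition,
-- same asymptotic cost); equivalence of the two loop orders is proved on k ≥ 1, p ≥ 1.

-- ===== PORT A =====
-- pow(b, e, p) for e ≥ 0, p ≥ 1 (the only uses admitted by Pre_): exact there
def pvPowmod (b e p : Int) : Int := PySem.Int.mod (b ^ e.toNat) p

-- xs[i]; all indexing admitted by Pre_ is in range, so the default is never read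
def pvAt (xs : List Int) (i : Int) : Int := PySem.List.pyGetD xs i 0

-- pow3 = [pow(3, e, p) for e in range(k)]
def pvPow3 (k p : Int) : List Int := (PySem.List.pyRange 0 k 1).map (fun e => pvPowmod 3 e p)

-- pow2 = [pow(2, e, p) for e in range(S)]
def pvPow2 (S p : Int) : List Int := (PySem.List.pyRange 0 S 1).map (fun e => pvPowmod 2 e p)

-- dp[j][r] read
def pvGet2 (dp : List (List Int)) (j r : Int) : Int := pvAt (PySem.List.pyGetD dp j []) r

-- dp[j][r] += v (indices are nonnegative and in range at every use admitted by Pre_)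
def pvAdd2 (dp : List (List Int)) (j r v : Int) : List (List Int) :=
  dp.modify j.toNat (fun row => row.modify r.toNat (· + v))

-- dp = [[0]*p for _ in range(k)]; dp[0][0] = 1
def pvDP0L (k p : Int) : List (List Int) :=
  ((PySem.List.pyRange 0 k 1).map (fun _ => List.replicate p.toNat 0)).modify 0
    (fun row => row.set 0 1)

-- body of the r-loop: if dp[j][r] > 0: dp[j+1][(r+weight)%p] += dp[j][r]
def pvRBodyL (p w j : Int) (d : List (List Int)) (r : Int) : List (List Int) :=
  if pvGet2 d j r > 0 then pvAdd2 d (j+1) (PySem.Int.mod (r + w) p) (pvGet2 d j r) else d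

-- one iteration of A's pos-loop: for j in range(min(k-2, pos-1), -1, -1): weight = …; for r in range(p): …
def pvAStepL (k S p : Int) (dp : List (List Int)) (pos : Int) : List (List Int) :=
  (PySem.List.pyRange (min (k-2) (pos-1)) (-1) (-1)).foldl
    (fun d j =>
      (PySem.List.pyRange 0 p 1).foldl
        (pvRBodyL p (PySem.Int.mod (pvAt (pvPow3 k p) (k-2-j) * pvAt (pvPow2 S p) pos) p) j) d)
    dp

def dp_count_n0_mod_p (k : Int) (S : Int) (p : Int) : Int :=
  pvGet2 ((PySem.List.pyRange 1 S 1).foldl (pvAStepL k S p) (pvDP0L k p))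
    (k-1)
    (PySem.Int.mod (p - PySem.Int.mod (pvAt (pvPow3 k p) (k-1)) p) p)

-- ===== PORT B =====
-- wts = [(pow3[k-1-j] * pow2[pos]) % p for pos in range(1, m)]
def pvWts (k S m p j : Int) : List Int :=
  (PySem.List.pyRange 1 m 1).map
    (fun pos => PySem.Int.mod (pvAt (pvPow3 k p) (k-1-j) * pvAt (pvPow2 S p) pos) p)

-- per-residue column scan: s = 0; col = [0]; for pos in range(1, b): s += cols[(r - wts[pos-1]) % p][pos-1]; col.append(s)
def pvColFold (p r : Int) (wts : List Int) (cols : List (List Int)) (b : Int) : Int × List Int :=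
  (PySem.List.pyRange 1 b 1).foldl
    (fun sc pos =>
      (sc.1 + pvAt (PySem.List.pyGetD cols (PySem.Int.mod (r - pvAt wts (pos-1)) p) []) (pos-1),
       sc.2 ++ [sc.1 + pvAt (PySem.List.pyGetD cols (PySem.Int.mod (r - pvAt wts (pos-1)) p) []) (pos-1)]))
    (0, [0])

-- one iteration of B's layer loop (rank j): newcols = []; for r in range(p): … ; newcols.append(col)
def pvBStepL (k S m p : Int) (cols : List (List Int)) (j : Int) : List (List Int) :=
  (PySem.List.pyRange 0 p 1).foldl
    (fun newcols r => newcols ++ [(pvColFold p r (pvWts k S m p j) cols m).2]) []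

def dp_count_n0_mod_p_alt (k : Int) (S : Int) (p : Int) : Int :=
  pvAt (PySem.List.pyGetD
      ((PySem.List.pyRange 1 k 1).foldl (pvBStepL k S (max S 1) p)
        ((PySem.List.pyRange 0 p 1).map
          (fun r => List.replicate (max S 1).toNat (if r = 0 then 1 else 0))))
      (PySem.Int.mod (p - PySem.Int.mod (pvAt (pvPow3 k p) (k-1)) p) p) [])
    (max S 1 - 1)

-- ===== PRECONDITION & SPEC =====
-- A raises on every input outside Pre_: IndexError (pow3[k-1] on k ≤ 0, dp[0][0] on p < 0)
-- or ValueError (pow(3, e, 0)); Pre_ excludes exactly those inputs.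
def Pre_dp_count_n0_mod_p (k : Int) (S : Int) (p : Int) : Prop := 1 ≤ k ∧ 1 ≤ p
instance (k : Int) (S : Int) (p : Int) : Decidable (Pre_dp_count_n0_mod_p k S p) := by
  unfold Pre_dp_count_n0_mod_p; infer_instance

def pvWitness_dp_count_n0_mod_p : Int × Int × Int := (2, 4, 5)

def Spec_dp_count_n0_mod_p (k : Int) (S : Int) (p : Int) (out : Int) : Prop := out = dp_count_n0_mod_p_alt k S p
instance (k : Int) (S : Int) (p : Int) (out : Int) : Decidable (Spec_dp_count_n0_mod_p k S p out) := by
  unfold Spec_dp_count_n0_mod_p; infer_instance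

-- ===== CLAIM (what is proved, stated in full; the proofs are below) =====
def Claim_equal_dp_count_n0_mod_p : Prop := ∀ (k : Int) (S : Int) (p : Int), Dom_dp_count_n0_mod_p k S p → Pre_dp_count_n0_mod_p k S p → Spec_dp_count_n0_mod_p k S p (dp_count_n0_mod_p k S p)

-- ===== LEMMAS AND PROOFS =====

-- function-level mirror of A's state and loops, used as the proof-side abstraction of the tables
def pvUpd (dp : Int → Int → Int) (j r v : Int) : Int → Int → Int :=
  fun j' r' => if j' = j ∧ r' = r then dp j' r' + v else dp j' r'

def pvDP0 : Int → Int → Int := fun j r => if j = 0 ∧ r = 0 then 1 else 0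

def pvRBody (p w j : Int) (d : Int → Int → Int) (r : Int) : Int → Int → Int :=
  if d j r > 0 then pvUpd d (j+1) (PySem.Int.mod (r + w) p) (d j r) else d

def pvAStep (k S p : Int) (dp : Int → Int → Int) (pos : Int) : Int → Int → Int :=
  (PySem.List.pyRange (min (k-2) (pos-1)) (-1) (-1)).foldl
    (fun d j =>
      (PySem.List.pyRange 0 p 1).foldl
        (pvRBody p (PySem.Int.mod (pvAt (pvPow3 k p) (k-2-j) * pvAt (pvPow2 S p) pos) p) j) d)
    dp

-- the abstraction of a table as a total function (0 outside the nonnegative quadrant)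
def pvAbs (dp : List (List Int)) : Int → Int → Int :=
  fun j r => if 0 ≤ j ∧ 0 ≤ r then pvGet2 dp j r else 0

def pvShape (k p : Int) (dp : List (List Int)) : Prop :=
  dp.length = k.toNat ∧ ∀ row ∈ dp, row.length = p.toNat

-- weight of taking position pos as the (j+1)-th chosen one (0-indexed j): 3^(k-2-j)·2^pos mod p
def pvW (k p j pos : Int) : Int := PySem.Int.mod (pvPowmod 3 (k-2-j) p * pvPowmod 2 pos p) p

-- the common mathematical recurrence: pvN k p n j r = number of ways to choose j of the
-- positions 1..n with rank-weighted partial sum ≡ r (mod p)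
def pvN (k p : Int) : Nat → Int → Int → Int
  | 0, j, r => if j = 0 ∧ r = 0 then 1 else 0
  | n+1, j, r => pvN k p n j r + pvN k p n (j-1) (PySem.Int.mod (r - pvW k p (j-1) ((n : Int)+1)) p)

lemma pvN_neg (k p : Int) (n : Nat) (j r : Int) (hj : j < 0) : pvN k p n j r = 0 := by
  induction n generalizing j r with
  | zero => simp [pvN]; omega
  | succ n ih => simp [pvN, ih _ _ hj, ih _ _ (by omega : j - 1 < 0)]

lemma pvN_gt (k p : Int) (n : Nat) (j r : Int) (hj : (n : Int) < j) : pvN k p n j r = 0 := by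
  induction n generalizing j r with
  | zero => simp [pvN]; omega
  | succ n ih =>
    push_cast at hj
    simp only [pvN]
    rw [ih _ _ (by omega : (n : Int) < j), ih _ _ (by omega : (n : Int) < j - 1)]
    simp

lemma pvN_nonneg (k p : Int) (n : Nat) (j r : Int) : 0 ≤ pvN k p n j r := by
  induction n generalizing j r with
  | zero => simp [pvN]; split <;> omega
  | succ n ih => simpa [pvN] using add_nonneg (ih _ _) (ih _ _)

lemma pvN_zero_j (k p : Int) (n : Nat) (r : Int) : pvN k p n 0 r = if r = 0 then 1 else 0 := by
  induction n generalizing r with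
  | zero => simp [pvN]
  | succ n ih => simp [pvN, ih, pvN_neg k p n (-1) _ (by omega)]

lemma pv_cancel1 (p a w : Int) (h0 : 0 ≤ a) (h1 : a < p) :
    ((a + w) % p - w) % p = a := by
  conv_lhs => rw [Int.sub_emod, Int.emod_emod_of_dvd _ dvd_rfl, ← Int.sub_emod]
  simp [Int.emod_eq_of_lt h0 h1]

lemma pv_cancel2 (p r w : Int) (h0 : 0 ≤ r) (h1 : r < p) :
    ((r - w) % p + w) % p = r := by
  conv_lhs => rw [Int.add_emod, Int.emod_emod_of_dvd _ dvd_rfl, ← Int.add_emod]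
  simp [Int.emod_eq_of_lt h0 h1]

-- the r-loop adds row j shifted by w into row j+1 (suffix of the range starting at a)
lemma pvRloop (p w j : Int) (hp : 0 < p) :
    ∀ (n : Nat) (a : Int) (dp : Int → Int → Int), (p - a).toNat = n → 0 ≤ a →
    (∀ r, 0 ≤ r → r < p → 0 ≤ dp j r) →
    (PySem.List.pyRange a p 1).foldl (pvRBody p w j) dp
    = fun j' r' => if j' = j + 1 ∧ 0 ≤ r' ∧ r' < p ∧ a ≤ (r' - w) % p
                   then dp j' r' + dp j ((r' - w) % p) else dp j' r' := by
  intro n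
  induction n with
  | zero =>
    intro a dp hn ha hnn
    rw [PySem.List.pyRange_one_eq_nil (by omega)]
    simp only [List.foldl_nil]
    funext j' r'
    rw [if_neg]
    rintro ⟨-, -, h1, h2⟩
    have := Int.emod_lt_of_pos (r' - w) hp
    omega
  | succ n ih =>
    intro a dp hn ha hnn
    have hap : a < p := by omega
    rw [PySem.List.pyRange_one_cons hap]
    simp only [List.foldl_cons]
    have hd1 : pvRBody p w j dp a
        = fun j' r' => if j' = j + 1 ∧ r' = (a + w) % p then dp j' r' + dp j a else dp j' r' := by
      unfold pvRBody pvUpd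
      rw [PySem.Int.mod_eq_emod_of_pos hp]
      split_ifs with h
      · rfl
      · have hz : dp j a = 0 := le_antisymm (by omega) (hnn a ha hap)
        funext j' r'
        split_ifs with hc
        · rw [hz, add_zero]
        · rfl
    rw [hd1, ih (a+1) _ (by omega) (by omega) ?_]
    · funext j' r'
      have hx0 : 0 ≤ (r' - w) % p := Int.emod_nonneg _ (by omega)
      have hxp : (r' - w) % p < p := Int.emod_lt_of_pos _ hp
      have haw0 : 0 ≤ (a + w) % p := Int.emod_nonneg _ (by omega)
      have hawp : (a + w) % p < p := Int.emod_lt_of_pos _ hp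
      have hcan1 : ((a + w) % p - w) % p = a := pv_cancel1 p a w ha hap
      by_cases h1 : j' = j + 1
      · by_cases h2 : 0 ≤ r' ∧ r' < p
        · have hback : (r' - w) % p = a → r' = (a + w) % p := by
            intro hx
            rw [← hx, pv_cancel2 p r' w h2.1 h2.2]
          by_cases h3 : (r' - w) % p = a
          · have hr' : r' = (a + w) % p := hback h3
            rw [if_neg (by omega), if_pos ⟨h1, hr'⟩, if_pos ⟨h1, h2.1, h2.2, by omega⟩, h3]
          · have hr' : r' ≠ (a + w) % p := fun hc => h3 (by rw [hc, hcan1])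
            by_cases h4 : a + 1 ≤ (r' - w) % p
            · rw [if_pos ⟨h1, h2.1, h2.2, h4⟩, if_neg (by tauto),
                  if_neg (by rintro ⟨hj, -⟩; omega), if_pos ⟨h1, h2.1, h2.2, by omega⟩]
            · rw [if_neg (by tauto), if_neg (by tauto), if_neg (by rintro ⟨-, c1, c2, c3⟩; omega)]
        · rw [if_neg (by tauto), if_neg (by rintro ⟨-, hc⟩; exact h2 ⟨by omega, by omega⟩),
              if_neg (by tauto)]
      · rw [if_neg (by tauto), if_neg (by tauto), if_neg (by tauto)]
    · intro r h0 h1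
      rw [if_neg (by rintro ⟨hji, -⟩; omega)]
      exact hnn r h0 h1

-- the j-loop (descending) performs the shift for every rank j ∈ [0, J] at once
lemma pvJloop (p : Int) (hp : 0 < p) (w : Int → Int) :
    ∀ (n : Nat) (J : Int) (dp : Int → Int → Int), (J + 1).toNat = n →
    (∀ j r, 0 ≤ j → j ≤ J → 0 ≤ r → r < p → 0 ≤ dp j r) →
    (PySem.List.pyRange J (-1) (-1)).foldl
      (fun d j => (PySem.List.pyRange 0 p 1).foldl (pvRBody p (w j) j) d) dp
    = fun j' r' => if 1 ≤ j' ∧ j' ≤ J + 1 ∧ 0 ≤ r' ∧ r' < p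
                   then dp j' r' + dp (j'-1) ((r' - w (j'-1)) % p) else dp j' r' := by
  intro n
  induction n with
  | zero =>
    intro J dp hn hnn
    rw [PySem.List.pyRange_neg_one_eq_nil (by omega)]
    simp only [List.foldl_nil]
    funext j' r'
    rw [if_neg]
    rintro ⟨h1, h2, -, -⟩
    omega
  | succ n ih =>
    intro J dp hn hnn
    have hJ : 0 ≤ J := by omega
    rw [PySem.List.pyRange_neg_one_cons (by omega)]
    simp only [List.foldl_cons]
    have h1' : (PySem.List.pyRange 0 p 1).foldl (pvRBody p (w J) J) dp
        = fun j' r' => if j' = J + 1 ∧ 0 ≤ r' ∧ r' < p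
                       then dp j' r' + dp J ((r' - w J) % p) else dp j' r' := by
      rw [pvRloop p (w J) J hp (p - 0).toNat 0 dp rfl le_rfl
          (fun r h0 h1 => hnn J r hJ le_rfl h0 h1)]
      funext j' r'
      by_cases hc : j' = J + 1 ∧ 0 ≤ r' ∧ r' < p
      · rw [if_pos ⟨hc.1, hc.2.1, hc.2.2, Int.emod_nonneg _ (by omega)⟩, if_pos hc]
      · rw [if_neg (by tauto), if_neg hc]
    rw [h1', ih (J-1) _ (by omega) ?_]
    · funext j' r'
      by_cases hr : 0 ≤ r' ∧ r' < p
      · by_cases hb : j' = J + 1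
        · subst hb
          rw [if_neg (by rintro ⟨c1, c2, -, -⟩; omega), if_pos ⟨rfl, hr.1, hr.2⟩,
              if_pos ⟨by omega, by omega, hr.1, hr.2⟩]
          have hJ1 : J + 1 - 1 = J := by omega
          rw [hJ1]
        · by_cases ha : 1 ≤ j' ∧ j' ≤ J
          · rw [if_pos ⟨ha.1, by omega, hr.1, hr.2⟩, if_neg (by rintro ⟨c1, -⟩; omega),
                if_neg (by rintro ⟨c1, -⟩; omega), if_pos ⟨ha.1, by omega, hr.1, hr.2⟩]
          · rw [if_neg (by rintro ⟨c1, c2, -, -⟩; omega), if_neg (by rintro ⟨c1, -⟩; omega),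
                if_neg (by rintro ⟨c1, c2, -, -⟩; omega)]
      · rw [if_neg (by rintro ⟨-, -, c3, c4⟩; omega), if_neg (by rintro ⟨-, c3, c4⟩; omega),
            if_neg (by rintro ⟨-, -, c3, c4⟩; omega)]
    · intro jj r h0 h2 h3 h4
      rw [if_neg (by rintro ⟨e, -⟩; omega)]
      exact hnn jj r h0 (by omega) h3 h4

lemma pvAt_pow3 (k p i : Int) (h0 : 0 ≤ i) (h1 : i < k) : pvAt (pvPow3 k p) i = pvPowmod 3 i p := by
  unfold pvAt pvPow3
  rw [PySem.List.pyGetD_map_pyRange_of_nonneg _ _ _ _ h0 h1]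

lemma pvAt_pow2 (S p i : Int) (h0 : 0 ≤ i) (h1 : i < S) : pvAt (pvPow2 S p) i = pvPowmod 2 i p := by
  unfold pvAt pvPow2
  rw [PySem.List.pyGetD_map_pyRange_of_nonneg _ _ _ _ h0 h1]

-- one pos-iteration of A realises one step of the recurrence pvN
lemma pvAStep_inv (k S p : Int) (hp : 0 < p) (hk : 1 ≤ k) (pos : Int) (n : Nat)
    (hpos : pos = (n : Int) + 1) (hposS : pos < S) (dp : Int → Int → Int)
    (hinv : ∀ j r, j ≤ k-1 → 0 ≤ r → r < p → dp j r = pvN k p n j r) :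
    ∀ j r, j ≤ k-1 → 0 ≤ r → r < p → pvAStep k S p dp pos j r = pvN k p (n+1) j r := by
  intro j r hjk hr0 hrp
  unfold pvAStep
  have hJ : min (k-2) (pos-1) ≤ k - 2 := min_le_left _ _
  have hJ2 : min (k-2) (pos-1) ≤ pos - 1 := min_le_right _ _
  rw [pvJloop p hp (fun jj => PySem.Int.mod (pvAt (pvPow3 k p) (k-2-jj) * pvAt (pvPow2 S p) pos) p)
      (min (k-2) (pos-1) + 1).toNat (min (k-2) (pos-1)) dp rfl ?_]
  · beta_reduce
    by_cases hc : 1 ≤ j ∧ j ≤ min (k-2) (pos-1) + 1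
    · rw [if_pos ⟨hc.1, hc.2, hr0, hrp⟩,
          pvAt_pow3 k p (k-2-(j-1)) (by omega) (by omega),
          pvAt_pow2 S p pos (by omega) hposS,
          hinv j r hjk hr0 hrp,
          hinv (j-1) _ (by omega) (Int.emod_nonneg _ (by omega)) (Int.emod_lt_of_pos _ hp)]
      show pvN k p n j r + pvN k p n (j-1) ((r - pvW k p (j-1) pos) % p) = pvN k p (n+1) j r
      rw [show pvN k p (n+1) j r
            = pvN k p n j r + pvN k p n (j-1) (PySem.Int.mod (r - pvW k p (j-1) ((n : Int)+1)) p)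
          from rfl,
          PySem.Int.mod_eq_emod_of_pos hp, ← hpos]
    · rw [if_neg (by tauto), hinv j r hjk hr0 hrp]
      rw [show pvN k p (n+1) j r
            = pvN k p n j r + pvN k p n (j-1) (PySem.Int.mod (r - pvW k p (j-1) ((n : Int)+1)) p)
          from rfl]
      by_cases hj0 : j ≤ 0
      · rw [pvN_neg k p n (j-1) _ (by omega), add_zero]
      · rw [pvN_gt k p n (j-1) _ (by omega), add_zero]
  · intro jj rr h0 h1 h2 h3
    rw [hinv jj rr (by omega) h2 h3]
    exact pvN_nonneg k p n jj rr

-- A's whole pos-loop computes pvN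
lemma pvAloop (k S p : Int) (hp : 0 < p) (hk : 1 ≤ k) :
    ∀ (n : Nat) (b : Int), (b - 1).toNat = n → 1 ≤ b → b ≤ S →
    ∀ j r, j ≤ k-1 → 0 ≤ r → r < p →
    ((PySem.List.pyRange 1 b 1).foldl (pvAStep k S p) pvDP0) j r = pvN k p n j r := by
  intro n
  induction n with
  | zero =>
    intro b hb h1 hS j r hjk hr0 hrp
    have hb1 : b = 1 := by omega
    subst hb1
    rw [PySem.List.pyRange_one_eq_nil le_rfl]
    simp [pvDP0, pvN]
  | succ n ih =>
    intro b hb h1 hS j r hjk hr0 hrp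
    obtain ⟨c, rfl⟩ : ∃ c, b = c + 1 := ⟨b - 1, by omega⟩
    have hc1 : 1 ≤ c := by omega
    rw [PySem.List.pyRange_one_succ_right (by omega), List.foldl_append]
    simp only [List.foldl_cons, List.foldl_nil]
    exact pvAStep_inv k S p hp hk c n (by omega) (by omega) _
      (fun j' r' hj' h0' h1' => ih c (by omega) hc1 (by omega) j' r' hj' h0' h1')
      j r hjk hr0 hrp


lemma pvGet2_nonneg_eq (dp : List (List Int)) (j r : Int) (hj : 0 ≤ j) (hr : 0 ≤ r) :
    pvGet2 dp j r = (dp.getD j.toNat []).getD r.toNat 0 := by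
  unfold pvGet2 pvAt
  rw [PySem.List.pyGetD_of_nonneg dp [] hj, PySem.List.pyGetD_of_nonneg _ 0 hr]

lemma pvFoldCommute {sig : Type} (P : sig → Prop) (abs : sig → Int → Int → Int)
    (fL : sig → Int → sig) (fF : (Int → Int → Int) → Int → Int → Int → Int) :
    ∀ (l : List Int) (s : sig), P s →
    (∀ s' x, P s' → x ∈ l → P (fL s' x) ∧ abs (fL s' x) = fF (abs s') x) →
    P (l.foldl fL s) ∧ abs (l.foldl fL s) = l.foldl fF (abs s) := by
  intro l
  induction l with
  | nil => intro s hs _; exact ⟨hs, rfl⟩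
  | cons a l ih =>
    intro s hs hstep
    have h1 := hstep s a hs List.mem_cons_self
    simp only [List.foldl_cons]
    rw [← h1.2]
    exact ih (fL s a) h1.1 (fun s' x h hx => hstep s' x h (List.mem_cons_of_mem _ hx))

lemma pvShape_DP0 (k p : Int) : pvShape k p (pvDP0L k p) := by
  constructor
  · unfold pvDP0L
    rw [List.length_modify, List.length_map, PySem.List.length_pyRange_one]
    omega
  · intro row hrow
    unfold pvDP0L at hrow
    obtain ⟨i, hi, heq⟩ := List.mem_iff_getElem.1 hrow
    subst heq
    rw [List.getElem_modify, List.getElem_map]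
    split_ifs <;> simp

lemma pvAdd2_shape (k p : Int) (dp : List (List Int)) (hsh : pvShape k p dp) (j r v : Int) :
    pvShape k p (pvAdd2 dp j r v) := by
  obtain ⟨h1, h2⟩ := hsh
  refine ⟨by unfold pvAdd2; rw [List.length_modify]; exact h1, ?_⟩
  intro row hrow
  unfold pvAdd2 at hrow
  obtain ⟨i, hi, heq⟩ := List.mem_iff_getElem.1 hrow
  subst heq
  rw [List.length_modify] at hi
  rw [List.getElem_modify]
  split_ifs
  · rw [List.length_modify]; exact h2 _ (List.getElem_mem hi)
  · exact h2 _ (List.getElem_mem hi)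

lemma pvAdd2_get (k p : Int) (dp : List (List Int)) (hsh : pvShape k p dp)
    (j r v : Int) (hj0 : 0 ≤ j) (hjk : j < k) (hr0 : 0 ≤ r) (hrp : r < p)
    (j' r' : Int) (hj' : 0 ≤ j') (hr' : 0 ≤ r') :
    pvGet2 (pvAdd2 dp j r v) j' r'
      = if j' = j ∧ r' = r then pvGet2 dp j' r' + v else pvGet2 dp j' r' := by
  obtain ⟨hlen, hrows⟩ := hsh
  rw [pvGet2_nonneg_eq _ _ _ hj' hr', pvGet2_nonneg_eq _ _ _ hj' hr']
  unfold pvAdd2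
  simp only [List.getD_eq_getElem?_getD, List.getElem?_modify]
  cases hdp : dp[j'.toNat]? with
  | none =>
    have hout : dp.length ≤ j'.toNat := List.getElem?_eq_none_iff.1 hdp
    rw [if_neg (by rintro ⟨h, -⟩; omega)]
    simp
  | some row =>
    have hrowlen : row.length = p.toNat := hrows _ (List.mem_of_getElem? hdp)
    simp only [Option.map_eq_map, Option.map_some, Option.getD_some]
    by_cases hjj : j.toNat = j'.toNat
    · rw [if_pos hjj]
      simp only [List.getElem?_modify]
      cases hrow : row[r'.toNat]? with
      | none =>
        have hout : row.length ≤ r'.toNat := List.getElem?_eq_none_iff.1 hrow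
        rw [if_neg (by rintro ⟨-, h⟩; omega)]
        simp
      | some x =>
        simp only [Option.map_eq_map, Option.map_some, Option.getD_some]
        by_cases hrr : r.toNat = r'.toNat
        · rw [if_pos hrr, if_pos ⟨by omega, by omega⟩]
        · rw [if_neg hrr, if_neg (by rintro ⟨-, h⟩; omega)]
    · rw [if_neg hjj, if_neg (by rintro ⟨h, -⟩; omega)]

lemma pvRBodyL_commute (k p w j : Int) (hp : 0 < p) (dp : List (List Int))
    (hsh : pvShape k p dp) (hj0 : 0 ≤ j) (hjk : j + 1 < k) (r : Int) (hr0 : 0 ≤ r) (hrp : r < p) :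
    pvShape k p (pvRBodyL p w j dp r)
      ∧ pvAbs (pvRBodyL p w j dp r) = pvRBody p w j (pvAbs dp) r := by
  have habs : pvAbs dp j r = pvGet2 dp j r := by unfold pvAbs; rw [if_pos ⟨hj0, hr0⟩]
  have hm0 : 0 ≤ PySem.Int.mod (r + w) p := by
    rw [PySem.Int.mod_eq_emod_of_pos hp]; exact Int.emod_nonneg _ (by omega)
  have hmp : PySem.Int.mod (r + w) p < p := by
    rw [PySem.Int.mod_eq_emod_of_pos hp]; exact Int.emod_lt_of_pos _ hp
  unfold pvRBodyL pvRBody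
  rw [habs]
  by_cases hg : pvGet2 dp j r > 0
  · rw [if_pos hg, if_pos hg]
    refine ⟨pvAdd2_shape k p dp hsh _ _ _, ?_⟩
    funext j' r'
    unfold pvAbs pvUpd
    beta_reduce
    by_cases hguard : 0 ≤ j' ∧ 0 ≤ r'
    · rw [if_pos hguard, if_pos hguard,
          pvAdd2_get k p dp hsh (j+1) (PySem.Int.mod (r + w) p) (pvGet2 dp j r)
            (by omega) hjk hm0 hmp j' r' hguard.1 hguard.2]
    · rw [if_neg hguard, if_neg hguard, if_neg (by rintro ⟨h1, h2⟩; omega)]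
  · rw [if_neg hg, if_neg hg]
    exact ⟨hsh, rfl⟩

lemma pvAStepL_commute (k S p : Int) (hp : 0 < p) (hk : 1 ≤ k) (pos : Int)
    (dp : List (List Int)) (hsh : pvShape k p dp) :
    pvShape k p (pvAStepL k S p dp pos)
      ∧ pvAbs (pvAStepL k S p dp pos) = pvAStep k S p (pvAbs dp) pos := by
  unfold pvAStepL pvAStep
  refine pvFoldCommute (pvShape k p) pvAbs _ _ _ dp hsh ?_
  intro s x hs hx
  rw [PySem.List.mem_pyRange_neg_one] at hx
  have hxk : x + 1 < k := by
    have := min_le_left (k-2) (pos-1)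
    omega
  refine pvFoldCommute (pvShape k p) pvAbs _ _ _ s hs ?_
  intro s' r hs' hr
  rw [PySem.List.mem_pyRange_one] at hr
  exact pvRBodyL_commute k p _ x hp s' hs' (by omega) hxk r hr.1 hr.2

lemma pvAbs_DP0 (k p : Int) (hk : 1 ≤ k) (hp : 1 ≤ p) : pvAbs (pvDP0L k p) = pvDP0 := by
  funext j r
  unfold pvAbs pvDP0
  by_cases hg : 0 ≤ j ∧ 0 ≤ r
  · rw [if_pos hg, pvGet2_nonneg_eq _ _ _ hg.1 hg.2]
    unfold pvDP0L
    simp only [List.getD_eq_getElem?_getD, List.getElem?_modify, List.getElem?_map]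
    cases hjr : (PySem.List.pyRange 0 k 1)[j.toNat]? with
    | none =>
      have hout : (PySem.List.pyRange 0 k 1).length ≤ j.toNat := List.getElem?_eq_none_iff.1 hjr
      rw [PySem.List.length_pyRange_one] at hout
      rw [if_neg (by rintro ⟨h, -⟩; omega)]
      simp
    | some y =>
      simp only [Option.map_eq_map, Option.map_some, Option.getD_some]
      by_cases hj0 : (0 : Nat) = j.toNat
      · rw [if_pos hj0]
        simp only [List.getElem?_set, List.getElem?_replicate, List.length_replicate]
        split_ifs <;> simp only [Option.getD_some, Option.getD_none] <;> omega
      · rw [if_neg hj0]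
        simp only [List.getElem?_replicate]
        split_ifs <;> simp only [Option.getD_some, Option.getD_none] <;> omega
  · rw [if_neg hg, if_neg (by rintro ⟨h1, h2⟩; exact hg ⟨by omega, by omega⟩)]

lemma pvAt_map_pyRange_one (f : Int → Int) (a b i : Int) (h0 : 0 ≤ i) (h1 : i < b - a) :
    pvAt ((PySem.List.pyRange a b 1).map f) i = f (a + i) := by
  unfold pvAt
  rw [PySem.List.pyGetD_of_nonneg _ 0 h0, List.getD_eq_getElem?_getD,
      List.getElem?_map, PySem.List.getElem?_pyRange_one, if_pos (by omega)]
  simp only [Option.map_some, Option.getD_some]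
  rw [show a + ((i.toNat : Int)) = a + i by omega]

lemma pvWts_at (k S m p j pos : Int) (hj1 : 1 ≤ j) (hjk : j ≤ k - 1)
    (h1 : 1 ≤ pos) (hm : pos < m) (hS : pos < S) :
    pvAt (pvWts k S m p j) (pos-1) = pvW k p (j-1) pos := by
  unfold pvWts
  rw [pvAt_map_pyRange_one _ 1 m (pos-1) (by omega) (by omega),
      show (1 : Int) + (pos-1) = pos by omega,
      pvAt_pow3 k p (k-1-j) (by omega) (by omega),
      pvAt_pow2 S p pos (by omega) hS,
      show k-1-j = k-2-(j-1) by omega]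
  rfl

-- B's per-residue column scan computes one column of pvN by running prefix sums
lemma pvBcolL (k S m p : Int) (hp : 0 < p) (j : Int) (hj1 : 1 ≤ j) (hjk : j ≤ k - 1)
    (cols : List (List Int))
    (hold : ∀ rr pos2, 0 ≤ rr → rr < p → 0 ≤ pos2 → pos2 < m →
      pvGet2 cols rr pos2 = pvN k p pos2.toNat (j-1) rr)
    (hposS : ∀ pos2, 1 ≤ pos2 → pos2 < m → pos2 < S)
    (r : Int) (hr0 : 0 ≤ r) (hrp : r < p) :
    ∀ (n : Nat) (b : Int), (b-1).toNat = n → 1 ≤ b → b ≤ m →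
    (pvColFold p r (pvWts k S m p j) cols b).1 = pvN k p (b-1).toNat j r
    ∧ (pvColFold p r (pvWts k S m p j) cols b).2.length = b.toNat
    ∧ ∀ pos2, 0 ≤ pos2 → pos2 < b →
        pvAt (pvColFold p r (pvWts k S m p j) cols b).2 pos2 = pvN k p pos2.toNat j r := by
  intro n
  induction n with
  | zero =>
    intro b hb h1 hm
    have hb1 : b = 1 := by omega
    subst hb1
    unfold pvColFold
    rw [PySem.List.pyRange_one_eq_nil le_rfl]
    simp only [List.foldl_nil]
    rw [show ((1:Int)-1).toNat = 0 from rfl]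
    refine ⟨by rw [pvN_gt k p 0 j r (by omega)], by simp, ?_⟩
    intro pos2 h2 h3
    have hpos0 : pos2 = 0 := by omega
    subst hpos0
    rw [show Int.toNat 0 = 0 from rfl, pvN_gt k p 0 j r (by omega)]
    decide
  | succ n ih =>
    intro b hb h1 hm
    obtain ⟨c, rfl⟩ : ∃ c, b = c + 1 := ⟨b - 1, by omega⟩
    have hc1 : 1 ≤ c := by omega
    obtain ⟨ihs, ihlen, ihval⟩ := ih c (by omega) hc1 (by omega)
    have hsplit : pvColFold p r (pvWts k S m p j) cols (c+1)
        = ((pvColFold p r (pvWts k S m p j) cols c).1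
            + pvAt (PySem.List.pyGetD cols
                (PySem.Int.mod (r - pvAt (pvWts k S m p j) (c-1)) p) []) (c-1),
           (pvColFold p r (pvWts k S m p j) cols c).2
            ++ [(pvColFold p r (pvWts k S m p j) cols c).1
                + pvAt (PySem.List.pyGetD cols
                    (PySem.Int.mod (r - pvAt (pvWts k S m p j) (c-1)) p) []) (c-1)]) := by
      unfold pvColFold
      rw [PySem.List.pyRange_one_succ_right (by omega), List.foldl_append,
          List.foldl_cons, List.foldl_nil]
    have hx : pvAt (PySem.List.pyGetD cols
          (PySem.Int.mod (r - pvAt (pvWts k S m p j) (c-1)) p) []) (c-1)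
        = pvN k p (c-1).toNat (j-1) (PySem.Int.mod (r - pvW k p (j-1) c) p) := by
      rw [pvWts_at k S m p j c hj1 hjk hc1 (by omega) (hposS c hc1 (by omega))]
      exact hold _ (c-1)
        (by rw [PySem.Int.mod_eq_emod_of_pos hp]; exact Int.emod_nonneg _ (by omega))
        (by rw [PySem.Int.mod_eq_emod_of_pos hp]; exact Int.emod_lt_of_pos _ hp)
        (by omega) (by omega)
    have hsum : (pvColFold p r (pvWts k S m p j) cols c).1
          + pvAt (PySem.List.pyGetD cols
              (PySem.Int.mod (r - pvAt (pvWts k S m p j) (c-1)) p) []) (c-1)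
        = pvN k p c.toNat j r := by
      rw [ihs, hx, show c.toNat = (c-1).toNat + 1 by omega]
      rw [show pvN k p ((c-1).toNat + 1) j r
            = pvN k p (c-1).toNat j r
              + pvN k p (c-1).toNat (j-1)
                  (PySem.Int.mod (r - pvW k p (j-1) (((c-1).toNat : Int)+1)) p)
          from rfl,
          show (((c-1).toNat : Int) + 1) = c by omega]
    refine ⟨?_, ?_, ?_⟩
    · have hcc : ((c+1:Int)-1).toNat = c.toNat := by omega
      rw [hsplit, hcc]
      exact hsum
    · rw [hsplit]
      simp only [List.length_append, ihlen, List.length_cons, List.length_nil]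
      omega
    · intro pos2 h2 h3
      rw [hsplit]
      by_cases hpc : pos2 = c
      · subst hpc
        unfold pvAt
        rw [PySem.List.pyGetD_of_nonneg _ 0 h2,
            List.getD_eq_getElem _ (0 : Int)
              (by simp only [List.length_append, ihlen, List.length_cons, List.length_nil]; omega),
            List.getElem_concat_length (by omega)]
        exact hsum
      · unfold pvAt
        rw [PySem.List.pyGetD_of_nonneg _ 0 h2,
            List.getD_eq_getElem _ (0 : Int)
              (by simp only [List.length_append, ihlen, List.length_cons, List.length_nil]; omega),
            List.getElem_append_left (by omega : pos2.toNat < (pvColFold p r (pvWts k S m p j) cols c).2.length),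
            ← List.getD_eq_getElem _ (0 : Int) (by omega),
            ← PySem.List.pyGetD_of_nonneg _ 0 h2]
        exact ihval pos2 h2 (by omega)

-- B's residue loop collects the p columns
lemma pvBrowsL (k S m p : Int) (hp : 0 < p) (j : Int) (hj1 : 1 ≤ j) (hjk : j ≤ k - 1)
    (hm : 1 ≤ m)
    (cols : List (List Int))
    (hold : ∀ rr pos2, 0 ≤ rr → rr < p → 0 ≤ pos2 → pos2 < m →
      pvGet2 cols rr pos2 = pvN k p pos2.toNat (j-1) rr)
    (hposS : ∀ pos2, 1 ≤ pos2 → pos2 < m → pos2 < S) :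
    ∀ (n : Nat) (rb : Int), rb.toNat = n → 0 ≤ rb → rb ≤ p →
    ((PySem.List.pyRange 0 rb 1).foldl
        (fun newcols r => newcols ++ [(pvColFold p r (pvWts k S m p j) cols m).2]) []).length = rb.toNat
    ∧ ∀ rr pos2, 0 ≤ rr → rr < rb → 0 ≤ pos2 → pos2 < m →
        pvGet2 ((PySem.List.pyRange 0 rb 1).foldl
          (fun newcols r => newcols ++ [(pvColFold p r (pvWts k S m p j) cols m).2]) []) rr pos2
          = pvN k p pos2.toNat j rr := by
  intro n
  induction n with
  | zero =>
    intro rb hrb h0 hrbp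
    have : rb = 0 := by omega
    subst this
    rw [PySem.List.pyRange_one_eq_nil le_rfl]
    exact ⟨rfl, fun rr pos2 h1 h2 => by omega⟩
  | succ n ih =>
    intro rb hrb h0 hrbp
    obtain ⟨c, rfl⟩ : ∃ c, rb = c + 1 := ⟨rb - 1, by omega⟩
    have hc0 : 0 ≤ c := by omega
    obtain ⟨ihlen, ihval⟩ := ih c (by omega) hc0 (by omega)
    rw [PySem.List.pyRange_one_succ_right (by omega), List.foldl_append,
        List.foldl_cons, List.foldl_nil]
    refine ⟨by simp only [List.length_append, ihlen, List.length_cons, List.length_nil]; omega, ?_⟩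
    intro rr pos2 h1 h2 h3 h4
    unfold pvGet2 pvAt
    rw [PySem.List.pyGetD_of_nonneg _ ([] : List Int) h1]
    by_cases hrc : rr = c
    · subst hrc
      rw [List.getD_eq_getElem _ ([] : List Int)
            (by simp only [List.length_append, ihlen, List.length_cons, List.length_nil]; omega),
          List.getElem_concat_length (by omega)]
      exact (pvBcolL k S m p hp j hj1 hjk cols hold hposS rr hc0 (by omega)
        (m-1).toNat m rfl hm le_rfl).2.2 pos2 h3 h4
    · rw [List.getD_eq_getElem _ ([] : List Int)
            (by simp only [List.length_append, ihlen, List.length_cons, List.length_nil]; omega),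
          List.getElem_append_left (by omega : rr.toNat < ((PySem.List.pyRange 0 c 1).foldl
            (fun newcols r => newcols ++ [(pvColFold p r (pvWts k S m p j) cols m).2]) []).length),
          ← List.getD_eq_getElem _ ([] : List Int) (by omega),
          ← PySem.List.pyGetD_of_nonneg _ ([] : List Int) h1]
      exact ihval rr pos2 h1 (by omega) h3 h4

-- B's outer layer loop (list level)
lemma pvBjloopL (k S p m : Int) (hp : 0 < p) (hm : 1 ≤ m)
    (hposS : ∀ pos2, 1 ≤ pos2 → pos2 < m → pos2 < S) :
    ∀ (n : Nat) (jb : Int), (jb - 1).toNat = n → 1 ≤ jb → jb ≤ k →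
    ∀ rr pos2, 0 ≤ rr → rr < p → 0 ≤ pos2 → pos2 < m →
    pvGet2 ((PySem.List.pyRange 1 jb 1).foldl (pvBStepL k S m p)
        ((PySem.List.pyRange 0 p 1).map
          (fun r => List.replicate m.toNat (if r = 0 then 1 else 0)))) rr pos2
      = pvN k p pos2.toNat (jb-1) rr := by
  intro n
  induction n with
  | zero =>
    intro jb hjb h1 hk2 rr pos2 h2 h3 h4 h5
    have hjb1 : jb = 1 := by omega
    subst hjb1
    rw [PySem.List.pyRange_one_eq_nil le_rfl]
    simp only [List.foldl_nil]
    unfold pvGet2 pvAt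
    rw [PySem.List.pyGetD_of_nonneg _ ([] : List Int) h2,
        List.getD_eq_getElem _ ([] : List Int)
          (by rw [List.length_map, PySem.List.length_pyRange_one]; omega),
        List.getElem_map,
        PySem.List.pyGetD_of_nonneg _ (0 : Int) h4,
        List.getD_eq_getElem _ (0 : Int) (by rw [List.length_replicate]; omega),
        List.getElem_replicate, PySem.List.getElem_pyRange_one,
        show (0:Int) + (rr.toNat : Int) = rr by omega,
        show (1:Int) - 1 = 0 from rfl, pvN_zero_j]
  | succ n ih =>
    intro jb hjb h1 hk2 rr pos2 h2 h3 h4 h5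
    obtain ⟨c, rfl⟩ : ∃ c, jb = c + 1 := ⟨jb - 1, by omega⟩
    have hc1 : 1 ≤ c := by omega
    rw [PySem.List.pyRange_one_succ_right (by omega), List.foldl_append,
        List.foldl_cons, List.foldl_nil, show c + 1 - 1 = c by omega, pvBStepL]
    exact (pvBrowsL k S m p hp c hc1 (by omega) hm _
      (fun rr' pos' a1 a2 a3 a4 => by
        rw [ih c (by omega) hc1 (by omega) rr' pos' a1 a2 a3 a4,
            show c - 1 = c + 1 - 1 - 1 by omega])
      hposS p.toNat p rfl (by omega) le_rfl).2 rr pos2 h2 h3 h4 h5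

-- ===== VERDICT (by name: the statement is the Claim_ definition above) =====
theorem dp_count_n0_mod_p_spec : Claim_equal_dp_count_n0_mod_p := by
  unfold Claim_equal_dp_count_n0_mod_p
  intro k S p _hdom hpre
  obtain ⟨hk, hp⟩ := hpre
  have hp' : 0 < p := by omega
  unfold Spec_dp_count_n0_mod_p dp_count_n0_mod_p dp_count_n0_mod_p_alt
  have hT0 : 0 ≤ PySem.Int.mod (p - PySem.Int.mod (pvAt (pvPow3 k p) (k-1)) p) p := by
    rw [PySem.Int.mod_eq_emod_of_pos hp']
    exact Int.emod_nonneg _ (by omega)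
  have hTp : PySem.Int.mod (p - PySem.Int.mod (pvAt (pvPow3 k p) (k-1)) p) p < p := by
    rw [PySem.Int.mod_eq_emod_of_pos hp']
    exact Int.emod_lt_of_pos _ hp'
  have e1 : ∀ (dp2 : List (List Int)) (jj rr : Int),
      pvAt (PySem.List.pyGetD dp2 jj []) rr = pvGet2 dp2 jj rr := fun _ _ _ => rfl
  -- B side
  rw [e1, pvBjloopL k S p (max S 1) hp' (by omega) (fun pos2 a1 a2 => by omega)
      (k-1).toNat k rfl (by omega) le_rfl _ (max S 1 - 1) hT0 hTp (by omega) (by omega)]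
  -- A side: commute the table fold with the function-level fold
  have hcomm := pvFoldCommute (pvShape k p) pvAbs (pvAStepL k S p) (pvAStep k S p)
    (PySem.List.pyRange 1 S 1) (pvDP0L k p) (pvShape_DP0 k p)
    (fun s x hs _hx => pvAStepL_commute k S p hp' hk x s hs)
  have habs : pvGet2 ((PySem.List.pyRange 1 S 1).foldl (pvAStepL k S p) (pvDP0L k p)) (k-1)
        (PySem.Int.mod (p - PySem.Int.mod (pvAt (pvPow3 k p) (k-1)) p) p)
      = ((PySem.List.pyRange 1 S 1).foldl (pvAStep k S p) pvDP0) (k-1)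
        (PySem.Int.mod (p - PySem.Int.mod (pvAt (pvPow3 k p) (k-1)) p) p) := by
    rw [← pvAbs_DP0 k p hk hp, ← hcomm.2]
    unfold pvAbs
    rw [if_pos ⟨by omega, hT0⟩]
  rw [habs]
  by_cases hS : 1 ≤ S
  · rw [pvAloop k S p hp' hk (S-1).toNat S rfl hS le_rfl (k-1) _ le_rfl hT0 hTp,
        show (max S 1 - 1).toNat = (S-1).toNat by omega]
  · rw [PySem.List.pyRange_one_eq_nil (by omega)]
    simp only [List.foldl_nil]
    rw [show (max S 1 - 1).toNat = 0 by omega]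
    simp [pvDP0, pvN]
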